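-- pv_equiv track=rewrite | github.com/ScrollPrize/villa | vesuvius/src/vesuvius/neural_tracing/autoreg_fiber/webknossos_annotations.py | _path_qc
-- ===== SOURCE A (Python) =====
-- from typing import Any, Iterable, Mapping, Sequence
--
-- def _get_attr(obj: Any, names: Sequence[str], default: Any = None) -> Any:
--     for name in names:
--         if isinstance(obj, Mapping) and name in obj:
--             return obj[name]
--         if hasattr(obj, name):
--             value = getattr(obj, name)
--             if value is not None:
--                 return value
--     return default
--
-- def _node_key(node: Any) -> tuple[str, Any]:
--     node_id = _get_attr(node, ("id", "_id"), None)
--     if node_id is not None: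
--         return ("id", node_id)
--     if isinstance(node, (str, int)):
--         return ("value", node)
--     return ("object", id(node))
--
-- def _path_qc(nodes: Sequence[Any], edges: Sequence[tuple[Any, Any]]) -> str | None:
--     if len(nodes) < 2:
--         return "too_few_nodes"
--     node_keys = [_node_key(node) for node in nodes]
--     node_key_set = set(node_keys)
--     adjacency = {key: set() for key in node_keys}
--     for left, right in edges:
--         left_key = _node_key(left)
--         right_key = _node_key(right)
--         if left_key not in node_key_set or right_key not in node_key_set:
--             return "edge_references_missing_node"
--         adjacency[left_key].add(right_key)
--         adjacency[right_key].add(left_key)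
--     if len(edges) != len(nodes) - 1:
--         return "cyclic_or_disconnected"
--     start = node_keys[0]
--     visited = {start}
--     stack = [start]
--     while stack:
--         current = stack.pop()
--         for nxt in adjacency[current]:
--             if nxt in visited:
--                 continue
--             visited.add(nxt)
--             stack.append(nxt)
--     if len(visited) != len(nodes):
--         return "disconnected"
--     degrees = [len(adjacency[key]) for key in node_keys]
--     if max(degrees) > 2:
--         return "branching"
--     if degrees.count(1) != 2:
--         return "not_a_single_path"
--     return None
-- ===== SOURCE B (Python) =====
-- from typing import Any, Sequence
--
-- def _node_key(node: Any) -> tuple[str, Any]: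
--     # int (and str) nodes have no 'id'/'_id' attribute, so their key is ("value", node)
--     return ("value", node)
--
-- def _path_qc(nodes: Sequence[Any], edges: Sequence[tuple[Any, Any]]) -> str | None:
--     # Connectivity by label merging (naive union-find) instead of a stack DFS.
--     if len(nodes) < 2:
--         return "too_few_nodes"
--     keys = [_node_key(node) for node in nodes]
--     keyset = set(keys)
--     pairs = [(_node_key(left), _node_key(right)) for left, right in edges]
--     if any(l not in keyset or r not in keyset for l, r in pairs):
--         return "edge_references_missing_node"
--     if len(edges) != len(nodes) - 1:
--         return "cyclic_or_disconnected"
--     label = {k: k for k in keyset}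
--     for l, r in pairs:
--         a, b = label[l], label[r]
--         if a != b:
--             label = {k: (a if v == b else v) for k, v in label.items()}
--     root = label[keys[0]]
--     if sum(1 for v in label.values() if v == root) != len(nodes):
--         return "disconnected"
--     neighbours = {k: set() for k in keyset}
--     for l, r in pairs:
--         neighbours[l].add(r)
--         neighbours[r].add(l)
--     degrees = [len(neighbours[k]) for k in keys]
--     if max(degrees) > 2:
--         return "branching"
--     if degrees.count(1) != 2:
--         return "not_a_single_path"
--     return None
-- ===== Notes on version B (the rewrite author's own statement) =====
-- stated objective: alternative
-- what changed: Connectivity is decided by merging component labels (a naive union-find over the node keys) instead of an explicit-stack DFS over the adjacency sets, edges are validated in a separate pass before the edge-count check, and the key helper returns ("value", node) directly for plain int/str nodes instead of probing attributes via _get_attr.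
import Mathlib
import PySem

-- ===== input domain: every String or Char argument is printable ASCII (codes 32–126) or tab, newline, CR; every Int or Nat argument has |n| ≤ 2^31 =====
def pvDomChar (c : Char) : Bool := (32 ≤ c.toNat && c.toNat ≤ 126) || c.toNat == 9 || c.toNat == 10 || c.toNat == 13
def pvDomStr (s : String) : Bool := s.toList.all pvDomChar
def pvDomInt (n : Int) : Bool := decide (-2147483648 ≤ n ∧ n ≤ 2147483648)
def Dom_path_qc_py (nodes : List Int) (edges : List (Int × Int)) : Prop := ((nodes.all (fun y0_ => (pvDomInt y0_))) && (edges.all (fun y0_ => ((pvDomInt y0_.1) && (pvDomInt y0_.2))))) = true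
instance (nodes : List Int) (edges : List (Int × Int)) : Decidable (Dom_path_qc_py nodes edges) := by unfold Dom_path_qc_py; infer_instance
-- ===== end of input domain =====

-- B replaces A's explicit-stack DFS connectivity check by naive union-find (component-label
-- merging); the guard, per-edge validation, edge count and degree checks keep A's behaviour.

-- ===== PORT A =====

-- _node_key: an Int node has no 'id' attribute and is an int, so it returns ("value", node);
-- the first component is the same for every node here, so key equality is Int equality and
-- the constant tag is dropped.
def pvNodeKey (n : Int) : Int := n

-- {key: set() for key in ks}
def pvInitSets (ks : List Int) : PySem.Dict Int (PySem.Set Int) :=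
  ks.foldl (fun d k => d.insert k ([] : PySem.Set Int)) PySem.Dict.empty

-- adjacency[l].add(r); adjacency[r].add(l)   (both keys are present, so modify = mutate)
def pvAddEdge (d : PySem.Dict Int (PySem.Set Int)) (l r : Int) : PySem.Dict Int (PySem.Set Int) :=
  (d.modify l ([] : PySem.Set Int) (fun s => s.add r)).modify r ([] : PySem.Set Int) (fun s => s.add l)

-- the 'for left, right in edges' loop; none = early return "edge_references_missing_node"
def pvEdgeLoopA (ks : PySem.Set Int) :
    List (Int × Int) → PySem.Dict Int (PySem.Set Int) → Option (PySem.Dict Int (PySem.Set Int))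
  | [], d => some d
  | (l, r) :: rest, d =>
    if !(ks.contains (pvNodeKey l)) || !(ks.contains (pvNodeKey r)) then none
    else pvEdgeLoopA ks rest (pvAddEdge d (pvNodeKey l) (pvNodeKey r))

-- the 'for nxt in adjacency[current]' body
def pvDfsStep (vs : PySem.Set Int × List Int) (nbrs : List Int) : PySem.Set Int × List Int :=
  nbrs.foldl (fun vs nxt => if nxt ∈ vs.1 then vs else (vs.1.add nxt, vs.2 ++ [nxt])) vs

-- the 'while stack' loop; the fuel 2*len(nodes)+1 bounds its iteration count (each iteration
-- pops one entry and every push also enlarges visited, which stays inside the ≤ len(nodes)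
-- distinct keys), see pvDfsA_spec below
def pvDfsA (adj : PySem.Dict Int (PySem.Set Int)) :
    Nat → PySem.Set Int × List Int → PySem.Set Int
  | 0, vs => vs.1
  | fuel + 1, (visited, stack) =>
    match PySem.List.pop? stack with
    | none => visited
    | some (current, stack') =>
      pvDfsA adj fuel (pvDfsStep (visited, stack') (adj.getD current ([] : PySem.Set Int)))

def path_qc_py (nodes : List Int) (edges : List (Int × Int)) : Option String :=
  if nodes.length < 2 then some "too_few_nodes" else
  let nodeKeys := nodes.map pvNodeKey
  let nodeKeySet : PySem.Set Int := PySem.Set.ofList nodeKeys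
  match pvEdgeLoopA nodeKeySet edges (pvInitSets nodeKeys) with
  | none => some "edge_references_missing_node"
  | some adjacency =>
    if (edges.length : Int) ≠ (nodes.length : Int) - 1 then some "cyclic_or_disconnected" else
    let start := nodeKeys.headI    -- node_keys[0]; nonempty since 2 ≤ len(nodes)
    let visited := pvDfsA adjacency (2 * nodes.length + 1) (PySem.Set.ofList [start], [start])
    if PySem.Set.len visited ≠ (nodes.length : Int) then some "disconnected" else
    let degrees := nodeKeys.map (fun k => (PySem.Set.len (adjacency.getD k ([] : PySem.Set Int)) : Int))
    if 2 < (PySem.List.max? degrees (fun x => x)).getD 0 then some "branching" else  -- degrees ≠ []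
    if PySem.List.count degrees 1 ≠ 2 then some "not_a_single_path" else
    none

-- ===== PORT B =====

-- label = {k: (a if v == b else v) for k, v in label.items()}  after a, b = label[l], label[r]
def pvLabelStep (d : PySem.Dict Int Int) (p : Int × Int) : PySem.Dict Int Int :=
  let a := d.getD p.1 0    -- key present: p.1 is a validated node key
  let b := d.getD p.2 0
  if a ≠ b then
    d.items.foldl (fun d' kv => d'.insert kv.1 (if kv.2 = b then a else kv.2)) PySem.Dict.empty
  else d

def path_qc_py_alt (nodes : List Int) (edges : List (Int × Int)) : Option String :=
  if nodes.length < 2 then some "too_few_nodes" else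
  let keys := nodes.map pvNodeKey
  let keyset : PySem.Set Int := PySem.Set.ofList keys
  let pairs := edges.map (fun e => (pvNodeKey e.1, pvNodeKey e.2))
  if pairs.any (fun p => !(keyset.contains p.1) || !(keyset.contains p.2)) then
    some "edge_references_missing_node" else
  if (edges.length : Int) ≠ (nodes.length : Int) - 1 then some "cyclic_or_disconnected" else
  let label0 := keyset.foldl (fun (d : PySem.Dict Int Int) k => d.insert k k) PySem.Dict.empty
  let label := pairs.foldl pvLabelStep label0
  let root := label.getD keys.headI 0    -- label[keys[0]]; present since keys[0] ∈ keyset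
  if (label.values.countP (fun v => v == root) : Int) ≠ (nodes.length : Int) then
    some "disconnected" else
  let neighbours := pairs.foldl (fun d p => pvAddEdge d p.1 p.2) (pvInitSets keyset)
  let degrees := keys.map (fun k => (PySem.Set.len (neighbours.getD k ([] : PySem.Set Int)) : Int))
  if 2 < (PySem.List.max? degrees (fun x => x)).getD 0 then some "branching" else  -- degrees ≠ []
  if PySem.List.count degrees 1 ≠ 2 then some "not_a_single_path" else
  none

-- ===== PRECONDITION & SPEC =====
def Spec_path_qc_py (nodes : List Int) (edges : List (Int × Int)) (out : Option String) : Prop := out = path_qc_py_alt nodes edges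
instance (nodes : List Int) (edges : List (Int × Int)) (out : Option String) : Decidable (Spec_path_qc_py nodes edges out) := by unfold Spec_path_qc_py; infer_instance

-- ===== CLAIM (what is proved, stated in full; the proofs are below) =====
def Claim_equal_path_qc_py : Prop := ∀ (nodes : List Int) (edges : List (Int × Int)), Dom_path_qc_py nodes edges → Spec_path_qc_py nodes edges (path_qc_py nodes edges)

-- ===== LEMMAS AND PROOFS =====

-- reflexive-symmetric-transitive closure of "is an edge of P"
def pvConn (P : List (Int × Int)) : Int → Int → Prop :=
  Relation.EqvGen (fun a b => (a, b) ∈ P)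

lemma pvEdgeLoopA_eq_none (ks : PySem.Set Int) (edges : List (Int × Int))
    (d : PySem.Dict Int (PySem.Set Int)) :
    pvEdgeLoopA ks edges d = none ↔ ¬ (∀ e ∈ edges, e.1 ∈ ks ∧ e.2 ∈ ks) := by
  induction edges generalizing d with
  | nil => simp [pvEdgeLoopA]
  | cons e rest ih =>
    obtain ⟨l, r⟩ := e
    by_cases hl : l ∈ ks
    · by_cases hr : r ∈ ks
      · have hl' : ks.contains l = true := (PySem.Set.contains_iff ks l).mpr hl
        have hr' : ks.contains r = true := (PySem.Set.contains_iff ks r).mpr hr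
        simp only [pvEdgeLoopA, pvNodeKey, hl', hr', Bool.not_true, Bool.or_self,
          Bool.false_eq_true, if_false, ih]
        constructor
        · intro h hall; exact h fun e he => hall e (List.mem_cons_of_mem _ he)
        · intro h hrest
          exact h fun e he =>
            (List.mem_cons.mp he).elim (fun heq => by subst heq; exact ⟨hl, hr⟩) (hrest e)
      · have hr' : ks.contains r = false :=
          Bool.eq_false_iff.mpr (fun hc => hr ((PySem.Set.contains_iff ks r).mp hc))
        simp only [pvEdgeLoopA, pvNodeKey, hr', Bool.not_false, Bool.or_true, if_true]
        simp only [true_iff]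
        intro hall
        exact hr (hall (l, r) (List.mem_cons_self ..)).2
    · have hl' : ks.contains l = false :=
        Bool.eq_false_iff.mpr (fun hc => hl ((PySem.Set.contains_iff ks l).mp hc))
      simp only [pvEdgeLoopA, pvNodeKey, hl', Bool.not_false, Bool.true_or, if_true]
      simp only [true_iff]
      intro hall
      exact hl (hall (l, r) (List.mem_cons_self ..)).1

lemma pvEdgeLoopA_eq_some (ks : PySem.Set Int) (edges : List (Int × Int))
    (d : PySem.Dict Int (PySem.Set Int)) (h : ∀ e ∈ edges, e.1 ∈ ks ∧ e.2 ∈ ks) :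
    pvEdgeLoopA ks edges d = some (edges.foldl (fun d p => pvAddEdge d p.1 p.2) d) := by
  induction edges generalizing d with
  | nil => simp [pvEdgeLoopA]
  | cons e rest ih =>
    obtain ⟨l, r⟩ := e
    have he := h (l, r) (List.mem_cons_self ..)
    have hl : ks.contains l = true := (PySem.Set.contains_iff ks l).mpr he.1
    have hr : ks.contains r = true := (PySem.Set.contains_iff ks r).mpr he.2
    simp only [pvEdgeLoopA, pvNodeKey, hl, hr, List.foldl_cons, Bool.not_true, Bool.or_self,
      Bool.false_eq_true, if_false]
    exact ih _ (fun e hmem => h e (List.mem_cons_of_mem _ hmem))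

lemma pv_getD_initSets (ks : List Int) (k : Int) :
    (pvInitSets ks).getD k ([] : PySem.Set Int) = [] := by
  suffices hgen : ∀ d : PySem.Dict Int (PySem.Set Int), d.getD k ([] : PySem.Set Int) = [] →
      (ks.foldl (fun d k => d.insert k ([] : PySem.Set Int)) d).getD k ([] : PySem.Set Int) = [] by
    exact hgen PySem.Dict.empty (by simp [pysem])
  induction ks with
  | nil => intro d hd; simpa using hd
  | cons x rest ih =>
    intro d hd
    simp only [List.foldl_cons]
    refine ih _ ?_
    by_cases hx : k = x
    · subst hx; simp [PySem.Dict.getD_insert_self]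
    · rw [PySem.Dict.getD_insert_of_ne _ _ _ hx]; exact hd

lemma pv_initSets_items (ks : List Int) :
    (pvInitSets ks).items = (PySem.Set.ofList ks).map (fun k => (k, ([] : PySem.Set Int))) := by
  have hkeys : (pvInitSets ks).keys = PySem.Set.ofList ks := by
    have := PySem.Dict.keys_foldl_insert ks (fun _ _ => ([] : PySem.Set Int)) PySem.Dict.empty
    simpa [pvInitSets] using this
  have hnd : (pvInitSets ks).keys.Nodup := by
    rw [hkeys]; exact PySem.Set.nodup_ofList ks
  rw [PySem.Dict.items_eq_map_keys _ hnd ([] : PySem.Set Int), hkeys]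
  exact List.map_congr_left (fun k _ => by rw [pv_getD_initSets])

lemma pv_initSets_dedup (ks : List Int) :
    pvInitSets (PySem.Set.ofList ks) = pvInitSets ks := by
  apply PySem.Dict.ext
  rw [pv_initSets_items, pv_initSets_items,
    PySem.Set.ofList_eq_self_of_nodup _ (PySem.Set.nodup_ofList ks)]

lemma pv_mem_getD_addEdge (d : PySem.Dict Int (PySem.Set Int)) (l r k m : Int) :
    m ∈ (pvAddEdge d l r).getD k ([] : PySem.Set Int) ↔
      m ∈ d.getD k ([] : PySem.Set Int) ∨ (k = l ∧ m = r) ∨ (k = r ∧ m = l) := by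
  unfold pvAddEdge
  by_cases hkr : k = r
  · subst hkr
    rw [PySem.Dict.getD_modify_self]
    by_cases hkl : k = l
    · subst hkl
      rw [PySem.Dict.getD_modify_self]
      simp only [PySem.Set.mem_add]
      tauto
    · rw [PySem.Dict.getD_modify_of_ne _ _ _ hkl]
      simp only [PySem.Set.mem_add]
      tauto
  · rw [PySem.Dict.getD_modify_of_ne _ _ _ hkr]
    by_cases hkl : k = l
    · subst hkl
      rw [PySem.Dict.getD_modify_self]
      simp only [PySem.Set.mem_add]
      tauto
    · rw [PySem.Dict.getD_modify_of_ne _ _ _ hkl]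
      tauto

lemma pv_mem_getD_adj (P : List (Int × Int)) (d : PySem.Dict Int (PySem.Set Int)) (k m : Int) :
    m ∈ (P.foldl (fun d p => pvAddEdge d p.1 p.2) d).getD k ([] : PySem.Set Int) ↔
      m ∈ d.getD k ([] : PySem.Set Int) ∨ (k, m) ∈ P ∨ (m, k) ∈ P := by
  induction P generalizing d with
  | nil => simp
  | cons p rest ih =>
    obtain ⟨l, r⟩ := p
    simp only [List.foldl_cons, ih, pv_mem_getD_addEdge, List.mem_cons, Prod.mk.injEq]
    tauto

-- neighbourhood of the final adjacency dict, characterised by the edge list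
lemma pv_mem_adj (P : List (Int × Int)) (ks : List Int) (k m : Int) :
    m ∈ (P.foldl (fun d p => pvAddEdge d p.1 p.2) (pvInitSets ks)).getD k ([] : PySem.Set Int) ↔
      (k, m) ∈ P ∨ (m, k) ∈ P := by
  rw [pv_mem_getD_adj, pv_getD_initSets]
  simp

-- EqvGen of an edge list is ReflTransGen of the symmetrised step relation
lemma pv_eqvGen_iff_reflTransGen (P : List (Int × Int)) (a b : Int) :
    pvConn P a b ↔ Relation.ReflTransGen (fun x y => (x, y) ∈ P ∨ (y, x) ∈ P) a b := by
  constructor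
  · intro h
    induction h with
    | rel x y hxy => exact Relation.ReflTransGen.single (Or.inl hxy)
    | refl => exact Relation.ReflTransGen.refl
    | symm x y _ ih =>
      exact Relation.ReflTransGen.symmetric (fun u v huv => Or.elim huv Or.inr Or.inl) ih
    | trans x y z _ _ ih₁ ih₂ => exact ih₁.trans ih₂
  · intro h
    induction h with
    | refl => exact Relation.EqvGen.refl a
    | tail _ hstep ih =>
      rename_i b' c'
      refine Relation.EqvGen.trans _ _ _ ih ?_
      rcases hstep with h' | h'
      · exact Relation.EqvGen.rel _ _ h'
      · exact Relation.EqvGen.symm _ _ (Relation.EqvGen.rel _ _ h')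

-- ---- generic helpers ----

lemma pv_len_le_of_nodup (l u : List Int) (hl : l.Nodup) (h : ∀ x ∈ l, x ∈ u) :
    l.length ≤ u.length := by
  calc l.length = l.toFinset.card := (List.toFinset_card_of_nodup hl).symm
    _ ≤ u.toFinset.card := Finset.card_le_card (fun x hx =>
        List.mem_toFinset.mpr (h x (List.mem_toFinset.mp hx)))
    _ ≤ u.length := u.toFinset_card_le

lemma pvConn_nil (k k' : Int) : pvConn [] k k' ↔ k = k' := by
  constructor
  · intro h
    induction h with
    | rel x y hxy => simp at hxy
    | refl => rfl
    | symm x y _ ih => exact ih.symm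
    | trans x y z _ _ ih₁ ih₂ => exact ih₁.trans ih₂
  · rintro rfl
    exact Relation.EqvGen.refl k

lemma pvConn_append_of_conn (P : List (Int × Int)) (p : Int × Int) (hlr : pvConn P p.1 p.2)
    (k k' : Int) : pvConn (P ++ [p]) k k' ↔ pvConn P k k' := by
  constructor
  · intro h
    induction h with
    | rel x y hxy =>
      rcases List.mem_append.mp hxy with h' | h'
      · exact Relation.EqvGen.rel _ _ h'
      · simp only [List.mem_singleton] at h'
        rw [← h'] at hlr
        exact hlr
    | refl => exact Relation.EqvGen.refl _
    | symm _ _ _ ih => exact Relation.EqvGen.symm _ _ ih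
    | trans _ _ _ _ _ ih₁ ih₂ => exact Relation.EqvGen.trans _ _ _ ih₁ ih₂
  · intro h
    exact Relation.EqvGen.mono (fun a b hab => List.mem_append_left _ hab) h

-- the union-find merge step: relabelling b-labelled keys to a refines f-equality to
-- connectivity of the extended edge list
lemma pvConn_merge (U : List Int) (P : List (Int × Int)) (p : Int × Int) (f : Int → Int)
    (hP : ∀ q ∈ P, q.1 ∈ U ∧ q.2 ∈ U) (hp1 : p.1 ∈ U) (hp2 : p.2 ∈ U)
    (hf : ∀ k ∈ U, ∀ k' ∈ U, (f k = f k' ↔ pvConn P k k'))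
    (hab : f p.1 ≠ f p.2) (k : Int) (hk : k ∈ U) (k' : Int) (hk' : k' ∈ U) :
    ((if f k = f p.2 then f p.1 else f k) = (if f k' = f p.2 then f p.1 else f k'))
      ↔ pvConn (P ++ [p]) k k' := by
  have hmono : ∀ x y, pvConn P x y → pvConn (P ++ [p]) x y :=
    fun x y h => Relation.EqvGen.mono (fun a b hab => List.mem_append_left _ hab) h
  have hrelp : pvConn (P ++ [p]) p.1 p.2 := by
    refine Relation.EqvGen.rel _ _ ?_
    simp
  constructor
  · intro h
    by_cases hkb : f k = f p.2 <;> by_cases hk'b : f k' = f p.2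
    · exact hmono _ _ ((hf k hk k' hk').mp (hkb.trans hk'b.symm))
    · rw [if_pos hkb, if_neg hk'b] at h
      have h1 : pvConn P k p.2 := (hf k hk p.2 hp2).mp hkb
      have h2 : pvConn P p.1 k' := (hf p.1 hp1 k' hk').mp h
      exact Relation.EqvGen.trans _ _ _ (hmono _ _ h1)
        (Relation.EqvGen.trans _ _ _ (Relation.EqvGen.symm _ _ hrelp) (hmono _ _ h2))
    · rw [if_neg hkb, if_pos hk'b] at h
      have h1 : pvConn P k p.1 := (hf k hk p.1 hp1).mp h
      have h2 : pvConn P p.2 k' := (hf p.2 hp2 k' hk').mp hk'b.symm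
      exact Relation.EqvGen.trans _ _ _ (hmono _ _ h1)
        (Relation.EqvGen.trans _ _ _ hrelp (hmono _ _ h2))
    · rw [if_neg hkb, if_neg hk'b] at h
      exact hmono _ _ ((hf k hk k' hk').mp h)
  · intro h
    have key : ∀ x y, pvConn (P ++ [p]) x y →
        (if f x = f p.2 then f p.1 else f x) = (if f y = f p.2 then f p.1 else f y) := by
      intro x y hxy
      induction hxy with
      | rel x y hxy =>
        rcases List.mem_append.mp hxy with h' | h'
        · have hq := hP _ h'
          rw [(hf x hq.1 y hq.2).mpr (Relation.EqvGen.rel _ _ h')]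
        · simp only [List.mem_singleton] at h'
          have hx : x = p.1 := by rw [← h']
          have hy : y = p.2 := by rw [← h']
          subst hx; subst hy
          rw [if_neg hab, if_pos rfl]
      | refl => rfl
      | symm _ _ _ ih => exact ih.symm
      | trans _ _ _ _ _ ih₁ ih₂ => exact ih₁.trans ih₂
    exact key k k' h

-- lookup in a dict whose items list is U.map (fun k => (k, f k))
lemma pv_getD_of_items (U : List Int) (hU : U.Nodup) (f : Int → Int) (d : PySem.Dict Int Int)
    (hitems : d.items = U.map (fun k => (k, f k))) (k : Int) (hk : k ∈ U) :
    d.getD k 0 = f k := by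
  have hkeys : d.keys = U := by
    simp only [PySem.Dict.keys, hitems, List.map_map]
    exact List.map_id'' (fun k => rfl) U
  have hnd : d.keys.Nodup := by rw [hkeys]; exact hU
  have hmem : (k, f k) ∈ d.items := by
    rw [hitems]; exact List.mem_map.mpr ⟨k, hk, rfl⟩
  rw [PySem.Dict.getD_eq_get?_getD, PySem.Dict.get?_of_mem_items d hmem hnd]
  rfl

-- ---- DFS side ----


-- what one pass of the inner for-loop guarantees
def pvStepOK (v : PySem.Set Int) (s nbrs : List Int) (r : PySem.Set Int × List Int) : Prop :=
  r.1.Nodup ∧ (∀ x ∈ v, x ∈ r.1) ∧ (∀ x ∈ r.1, x ∈ v ∨ x ∈ nbrs) ∧ (∀ m ∈ nbrs, m ∈ r.1) ∧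
  (∀ x ∈ r.2, x ∈ s ∨ x ∈ r.1) ∧ (∀ x ∈ s, x ∈ r.2) ∧ (∀ x ∈ r.1, x ∉ v → x ∈ r.2) ∧
  r.1.length + s.length = v.length + r.2.length

lemma pvDfsStep_spec (nbrs : List Int) (v : PySem.Set Int) (s : List Int) (hv : v.Nodup) :
    pvStepOK v s nbrs (pvDfsStep (v, s) nbrs) := by
  induction nbrs generalizing v s with
  | nil =>
    exact ⟨hv, fun x hx => hx, fun x hx => Or.inl hx, by simp, fun x hx => Or.inl hx,
      fun x hx => hx, fun x hx hxv => absurd hx hxv, rfl⟩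
  | cons n rest ih =>
    have hfold : pvDfsStep (v, s) (n :: rest) =
        pvDfsStep (if n ∈ v then (v, s) else (v.add n, s ++ [n])) rest := rfl
    by_cases hn : n ∈ v
    · rw [hfold, if_pos hn]
      obtain ⟨h1, h2, h3, h4, h5, h6, h7, h8⟩ := ih v s hv
      exact ⟨h1, h2, fun x hx => (h3 x hx).imp_right (List.mem_cons_of_mem _),
        fun m hm => (List.mem_cons.mp hm).elim (fun he => he ▸ h2 n hn) (h4 m),
        h5, h6, h7, h8⟩
    · rw [hfold, if_neg hn]
      have hadd : v.add n = v ++ [n] := PySem.Set.add_of_not_mem hn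
      have hv' : (v.add n).Nodup := PySem.Set.nodup_add v n hv
      obtain ⟨h1, h2, h3, h4, h5, h6, h7, h8⟩ := ih (v.add n) (s ++ [n]) hv'
      have hnadd : n ∈ v.add n := by rw [hadd]; simp
      refine ⟨h1, fun x hx => h2 x (by rw [hadd]; exact List.mem_append_left _ hx),
        ?_, ?_, ?_, ?_, ?_, ?_⟩
      · intro x hx
        rcases h3 x hx with hxv | hxr
        · rw [hadd] at hxv
          rcases List.mem_append.mp hxv with h | h
          · exact Or.inl h
          · simp only [List.mem_singleton] at h
            exact Or.inr (h ▸ List.mem_cons_self ..)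
        · exact Or.inr (List.mem_cons_of_mem _ hxr)
      · intro m hm
        rcases List.mem_cons.mp hm with he | hm'
        · exact he ▸ h2 n hnadd
        · exact h4 m hm'
      · intro x hx
        rcases h5 x hx with hxs | hxr
        · rcases List.mem_append.mp hxs with h | h
          · exact Or.inl h
          · simp only [List.mem_singleton] at h
            exact Or.inr (h ▸ h2 n hnadd)
        · exact Or.inr hxr
      · intro x hx
        exact h6 x (List.mem_append_left _ hx)
      · intro x hx hxv
        by_cases hxvn : x ∈ v.add n
        · rw [hadd] at hxvn
          rcases List.mem_append.mp hxvn with h | h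
          · exact absurd h hxv
          · simp only [List.mem_singleton] at h
            subst h
            exact h6 x (by simp)
        · exact h7 x hx hxvn
      · have hlv : (v.add n).length = v.length + 1 := by rw [hadd]; simp
        have hls : (s ++ [n]).length = s.length + 1 := by simp
        omega

-- main DFS lemma: with enough fuel the result is Nodup, closed under the adjacency, contains
-- the initial visited set and only reachable keys
-- what the whole while-loop guarantees: the result is duplicate-free, keeps the visited set,
-- stays inside U, reaches only reachable keys and is closed under the adjacency
def pvDfsOK (adj : PySem.Dict Int (PySem.Set Int)) (U : List Int) (start : Int)
    (v : PySem.Set Int) (r : PySem.Set Int) : Prop :=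
  r.Nodup ∧ (∀ x ∈ v, x ∈ r) ∧ (∀ x ∈ r, x ∈ U) ∧
  (∀ x ∈ r, Relation.ReflTransGen (fun a b => b ∈ adj.getD a ([] : PySem.Set Int)) start x) ∧
  (∀ x ∈ r, ∀ m ∈ adj.getD x ([] : PySem.Set Int), m ∈ r)

lemma pvDfsA_spec (adj : PySem.Dict Int (PySem.Set Int)) (U : List Int) (start : Int)
    (hN : ∀ k m, m ∈ adj.getD k ([] : PySem.Set Int) → m ∈ U) :
    ∀ fuel (v : PySem.Set Int) (s : List Int),
      v.Nodup → (∀ x ∈ v, x ∈ U) → (∀ x ∈ s, x ∈ v) →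
      (∀ x ∈ v, Relation.ReflTransGen (fun a b => b ∈ adj.getD a ([] : PySem.Set Int)) start x) →
      (∀ x ∈ v, x ∈ s ∨ ∀ m ∈ adj.getD x ([] : PySem.Set Int), m ∈ v) →
      2 * (U.length - v.length) + s.length ≤ fuel →
      pvDfsOK adj U start v (pvDfsA adj fuel (v, s)) := by
  intro fuel
  induction fuel with
  | zero =>
    intro v s hvnd hvU hsv hreach hclosed hfuel
    have hs : s = [] := by
      cases s with
      | nil => rfl
      | cons a t => simp only [List.length_cons] at hfuel; omega
    subst hs
    exact ⟨hvnd, fun x hx => hx, hvU, hreach,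
      fun x hx m hm => (hclosed x hx).elim (by simp) (fun h => h m hm)⟩
  | succ fuel ih =>
    intro v s hvnd hvU hsv hreach hclosed hfuel
    rcases List.eq_nil_or_concat s with hs | ⟨s', c, hs⟩
    · subst hs
      have hrw : pvDfsA adj (fuel + 1) (v, []) = v := by
        simp [pvDfsA, PySem.List.pop?]
      rw [hrw]
      exact ⟨hvnd, fun x hx => hx, hvU, hreach,
        fun x hx m hm => (hclosed x hx).elim (by simp) (fun h => h m hm)⟩
    · rw [List.concat_eq_append] at hs
      subst hs
      have hrw : pvDfsA adj (fuel + 1) (v, s' ++ [c]) =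
          pvDfsA adj fuel (pvDfsStep (v, s') (adj.getD c ([] : PySem.Set Int))) := by
        simp [pvDfsA, PySem.List.pop?_last]
      rw [hrw]
      obtain ⟨h1, h2, h3, h4, h5, h6, h7, h8⟩ :=
        pvDfsStep_spec (adj.getD c ([] : PySem.Set Int)) v s' hvnd
      have hcv : c ∈ v := hsv c (by simp)
      set r' := pvDfsStep (v, s') (adj.getD c ([] : PySem.Set Int)) with hr'
      have hvU' : ∀ x ∈ r'.1, x ∈ U := fun x hx => (h3 x hx).elim (hvU x) (hN c x)
      have hsv' : ∀ x ∈ r'.2, x ∈ r'.1 :=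
        fun x hx => (h5 x hx).elim (fun h => h2 x (hsv x (List.mem_append_left _ h))) id
      have hreach' : ∀ x ∈ r'.1,
          Relation.ReflTransGen (fun a b => b ∈ adj.getD a ([] : PySem.Set Int)) start x :=
        fun x hx => (h3 x hx).elim (hreach x) (fun hxn => (hreach c hcv).tail hxn)
      have hclosed' : ∀ x ∈ r'.1, x ∈ r'.2 ∨
          ∀ m ∈ adj.getD x ([] : PySem.Set Int), m ∈ r'.1 := by
        intro x hx
        by_cases hxv : x ∈ v
        · rcases hclosed x hxv with hxs | hcl
          · rcases List.mem_append.mp hxs with h | h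
            · exact Or.inl (h6 x h)
            · simp only [List.mem_singleton] at h
              subst h
              exact Or.inr (fun m hm => h4 m hm)
          · exact Or.inr (fun m hm => h2 m (hcl m hm))
        · exact Or.inl (h7 x hx hxv)
      have hlenU : r'.1.length ≤ U.length := pv_len_le_of_nodup _ _ h1 hvU'
      have hlenv : v.length ≤ r'.1.length := pv_len_le_of_nodup _ _ hvnd h2
      have hfuel' : 2 * (U.length - r'.1.length) + r'.2.length ≤ fuel := by
        have hslen : (s' ++ [c]).length = s'.length + 1 := by simp
        omega
      obtain ⟨g1, g2, g3, g4, g5⟩ :=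
        ih r'.1 r'.2 h1 hvU' hsv' hreach' hclosed' hfuel'
      exact ⟨g1, fun x hx => g2 x (h2 x hx), g3, g4, g5⟩

-- ---- label side ----

def pvRelabel (d : PySem.Dict Int Int) (a b : Int) : PySem.Dict Int Int :=
  d.items.foldl (fun d' kv => d'.insert kv.1 (if kv.2 = b then a else kv.2)) PySem.Dict.empty

-- label invariant: items = U.map (k, f k) and f-equality is pvConn of the processed prefix
def pvLabelInv (U : List Int) (P : List (Int × Int)) (d : PySem.Dict Int Int)
    (f : Int → Int) : Prop :=
  d.items = U.map (fun k => (k, f k)) ∧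
  (∀ k ∈ U, ∀ k' ∈ U, (f k = f k' ↔ pvConn P k k'))

lemma pvLabel_inv_step (U : List Int) (hU : U.Nodup) (P : List (Int × Int)) (p : Int × Int)
    (hp : p.1 ∈ U ∧ p.2 ∈ U) (d : PySem.Dict Int Int) (f : Int → Int)
    (hP : ∀ q ∈ P, q.1 ∈ U ∧ q.2 ∈ U) (h : pvLabelInv U P d f) :
    ∃ g, pvLabelInv U (P ++ [p]) (pvLabelStep d p) g := by
  obtain ⟨hitems, hf⟩ := h
  have hget1 : d.getD p.1 0 = f p.1 := pv_getD_of_items U hU f d hitems p.1 hp.1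
  have hget2 : d.getD p.2 0 = f p.2 := pv_getD_of_items U hU f d hitems p.2 hp.2
  by_cases hab : f p.1 = f p.2
  · refine ⟨f, ?_, ?_⟩
    · have hid : pvLabelStep d p = d := by
        simp [pvLabelStep, hget1, hget2, hab]
      rw [hid]
      exact hitems
    · intro k hk k' hk'
      rw [hf k hk k' hk']
      exact (pvConn_append_of_conn P p ((hf p.1 hp.1 p.2 hp.2).mp hab) k k').symm
  · refine ⟨fun k => if f k = f p.2 then f p.1 else f k, ?_, ?_⟩
    · have hstep : pvLabelStep d p = d.items.foldl
          (fun d' kv => d'.insert kv.1 (if kv.2 = f p.2 then f p.1 else kv.2))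
          PySem.Dict.empty := by
        simp [pvLabelStep, hget1, hget2, hab]
      have hkeys_nodup : (d.items.map Prod.fst).Nodup := by
        rw [hitems, List.map_map]
        have hcomp : List.map (Prod.fst ∘ fun k => (k, f k)) U = U := by
          simp [Function.comp_def]
        rw [hcomp]
        exact hU
      have hfold := PySem.Dict.items_foldl_insert_fresh d.items (fun kv => kv.1)
        (fun kv => if kv.2 = f p.2 then f p.1 else kv.2) PySem.Dict.empty
        (fun _ _ => PySem.Dict.contains_empty _) hkeys_nodup
      have hempty : (PySem.Dict.empty : PySem.Dict Int Int).items = [] := rfl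
      rw [hstep, hfold, hitems]
      simp [Function.comp_def, hempty]
    · intro k hk k' hk'
      exact pvConn_merge U P p f hP hp.1 hp.2 hf hab k hk k' hk'

lemma pvLabel_inv_fold (U : List Int) (hU : U.Nodup) :
    ∀ (Q P : List (Int × Int)), (∀ q ∈ P, q.1 ∈ U ∧ q.2 ∈ U) →
    (∀ q ∈ Q, q.1 ∈ U ∧ q.2 ∈ U) → ∀ (d : PySem.Dict Int Int) (f : Int → Int),
    pvLabelInv U P d f → ∃ g, pvLabelInv U (P ++ Q) (Q.foldl pvLabelStep d) g := by
  intro Q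
  induction Q with
  | nil =>
    intro P hP _ d f h
    exact ⟨f, by simpa using h⟩
  | cons p Q' ih =>
    intro P hP hQ d f h
    obtain ⟨g, hg⟩ := pvLabel_inv_step U hU P p (hQ p (List.mem_cons_self ..)) d f hP h
    have hP' : ∀ q ∈ P ++ [p], q.1 ∈ U ∧ q.2 ∈ U := by
      intro q hq
      rcases List.mem_append.mp hq with h' | h'
      · exact hP q h'
      · simp only [List.mem_singleton] at h'
        exact h' ▸ hQ p (List.mem_cons_self ..)
    obtain ⟨g', hg'⟩ := ih (P ++ [p]) hP' (fun q hq => hQ q (List.mem_cons_of_mem _ hq)) _ g hg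
    refine ⟨g', ?_⟩
    simpa [List.append_assoc] using hg'

lemma pvLabel_inv_final (U : List Int) (hU : U.Nodup) (pairs : List (Int × Int))
    (hp : ∀ p ∈ pairs, p.1 ∈ U ∧ p.2 ∈ U) :
    ∃ f, pvLabelInv U pairs
      (pairs.foldl pvLabelStep
        (U.foldl (fun (d : PySem.Dict Int Int) k => d.insert k k) PySem.Dict.empty)) f := by
  have h0items : (U.foldl (fun (d : PySem.Dict Int Int) k => d.insert k k)
      PySem.Dict.empty).items = U.map (fun k => (k, k)) := by
    have := PySem.Dict.items_foldl_insert_fresh U (fun k => k) (fun k => k) PySem.Dict.empty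
      (fun _ _ => PySem.Dict.contains_empty _) (by simpa using hU)
    simpa using this
  have h0 : pvLabelInv U [] (U.foldl (fun (d : PySem.Dict Int Int) k => d.insert k k)
      PySem.Dict.empty) (fun k => k) := by
    refine ⟨by simpa using h0items, fun k hk k' hk' => ?_⟩
    exact (pvConn_nil k k').symm
  obtain ⟨g, hg⟩ := pvLabel_inv_fold U hU pairs [] (by simp) hp _ _ h0
  exact ⟨g, by simpa using hg⟩

-- ===== VERDICT (by name: the statement is the Claim_ definition above) =====
lemma pv_map_nodeKey (l : List Int) : List.map pvNodeKey l = l := by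
  rw [List.map_congr_left (fun x _ => rfl : ∀ x ∈ l, pvNodeKey x = id x)]
  exact List.map_id l

lemma pv_pairs_map (l : List (Int × Int)) :
    List.map (fun e : Int × Int => (pvNodeKey e.1, pvNodeKey e.2)) l = l := by
  simp [pvNodeKey]

theorem path_qc_py_spec : Claim_equal_path_qc_py := by
  intro nodes edges _
  unfold Spec_path_qc_py
  by_cases h2 : nodes.length < 2
  · simp [path_qc_py, path_qc_py_alt, h2]
  · simp only [path_qc_py, path_qc_py_alt, if_neg h2, pv_map_nodeKey, pv_pairs_map]
    by_cases hval : ∀ e ∈ edges, e.1 ∈ PySem.Set.ofList nodes ∧ e.2 ∈ PySem.Set.ofList nodes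
    · rw [pvEdgeLoopA_eq_some _ _ _ hval]
      have hanyf : (edges.any fun p => !((PySem.Set.ofList nodes).contains p.1) ||
          !((PySem.Set.ofList nodes).contains p.2)) = false := by
        rw [List.any_eq_false]
        intro p hp
        have hm := hval p hp
        rw [PySem.Set.mem_ofList, PySem.Set.mem_ofList] at hm
        simpa using hm
      rw [hanyf]
      simp only [Bool.false_eq_true, if_false]
      by_cases hcnt : (edges.length : Int) ≠ (nodes.length : Int) - 1
      · simp [hcnt]
      · rw [if_neg hcnt, if_neg hcnt, pv_initSets_dedup nodes]
        clear hanyf hcnt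
        set U := PySem.Set.ofList nodes with hU
        have hUnd : U.Nodup := PySem.Set.nodup_ofList nodes
        have hne : nodes ≠ [] := by
          intro h
          rw [h] at h2
          simp at h2
        have hstart : nodes.headI ∈ nodes := by
          cases nodes with
          | nil => exact absurd rfl hne
          | cons a t => exact List.mem_cons_self ..
        have hstartU : nodes.headI ∈ U := (PySem.Set.mem_ofList ..).mpr hstart
        set adjacency := List.foldl (fun d p => pvAddEdge d p.1 p.2) (pvInitSets nodes) edges
          with hadj
        have hN : ∀ k m, m ∈ adjacency.getD k ([] : PySem.Set Int) → m ∈ U := by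
          intro k m hm
          rw [hadj, pv_mem_adj] at hm
          rcases hm with h | h
          · exact (hval _ h).2
          · exact (hval _ h).1
        have hsingle : PySem.Set.ofList [nodes.headI] = [nodes.headI] := rfl
        have hUlen : U.length ≤ nodes.length :=
          pv_len_le_of_nodup U nodes hUnd (fun x hx => (PySem.Set.mem_ofList ..).mp hx)
        obtain ⟨hrnd, hrv, hrU, hrreach, hrclosed⟩ :=
          pvDfsA_spec adjacency U nodes.headI hN (2 * nodes.length + 1)
            (PySem.Set.ofList [nodes.headI]) [nodes.headI]
            (by rw [hsingle]; simp)
            (by rw [hsingle]; intro x hx; simp only [List.mem_singleton] at hx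
                exact hx ▸ hstartU)
            (by rw [hsingle]; exact fun x hx => hx)
            (by rw [hsingle]; intro x hx; simp only [List.mem_singleton] at hx
                subst hx; exact Relation.ReflTransGen.refl)
            (by rw [hsingle]; intro x hx; exact Or.inl hx)
            (by rw [hsingle]; simp only [List.length_singleton]; omega)
        set visited := pvDfsA adjacency (2 * nodes.length + 1)
          (PySem.Set.ofList [nodes.headI], [nodes.headI]) with hvis
        have hstartr : nodes.headI ∈ visited := hrv _ (by rw [hsingle]; simp)
        have hstep_iff : ∀ a b : Int, b ∈ adjacency.getD a ([] : PySem.Set Int) ↔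
            ((a, b) ∈ edges ∨ (b, a) ∈ edges) := by
          intro a b
          rw [hadj, pv_mem_adj]
        have hmem_iff : ∀ x, x ∈ visited ↔ pvConn edges nodes.headI x := by
          intro x
          constructor
          · intro hx
            rw [pv_eqvGen_iff_reflTransGen]
            exact Relation.ReflTransGen.mono (fun a b hab => (hstep_iff a b).mp hab)
              (hrreach x hx)
          · intro hx
            rw [pv_eqvGen_iff_reflTransGen] at hx
            have hx' := Relation.ReflTransGen.mono
              (fun a b hab => (hstep_iff a b).mpr hab) hx
            clear hx
            induction hx' with
            | refl => exact hstartr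
            | tail h1 hstep ih => exact hrclosed _ ih _ hstep
        obtain ⟨f, hfitems, hfequiv⟩ := pvLabel_inv_final U hUnd edges hval
        set label := List.foldl pvLabelStep
          (List.foldl (fun (d : PySem.Dict Int Int) k => d.insert k k) PySem.Dict.empty U)
          edges with hlab
        have hroot : label.getD nodes.headI 0 = f nodes.headI :=
          pv_getD_of_items U hUnd f label hfitems _ hstartU
        have hvals : label.values = U.map f := by
          simp only [PySem.Dict.values, hfitems, List.map_map]
          simp [Function.comp_def]
        have hperm : visited.Perm (U.filter (fun k => f k == f nodes.headI)) := by
          refine (List.perm_ext_iff_of_nodup hrnd (hUnd.filter _)).mpr ?_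
          intro x
          rw [List.mem_filter]
          constructor
          · intro hx
            refine ⟨hrU x hx, ?_⟩
            exact beq_iff_eq.mpr ((hfequiv x (hrU x hx) nodes.headI hstartU).mpr
              (Relation.EqvGen.symm _ _ ((hmem_iff x).mp hx)))
          · rintro ⟨hxU, hfx⟩
            exact (hmem_iff x).mpr (Relation.EqvGen.symm _ _
              ((hfequiv x hxU nodes.headI hstartU).mp (beq_iff_eq.mp hfx)))
        have hlen : visited.length = List.countP (fun k => f k == f nodes.headI) U := by
          rw [hperm.length_eq, ← List.countP_eq_length_filter]
        have hfinal : PySem.Set.len visited =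
            (List.countP (fun v => v == f nodes.headI) (U.map f) : Int) := by
          rw [List.countP_map]
          simp only [Function.comp_def]
          have hl : PySem.Set.len visited = (visited.length : Int) := rfl
          rw [hl, hlen]
        rw [hvals, hroot, hfinal]
    · have hnone : pvEdgeLoopA (PySem.Set.ofList nodes) edges (pvInitSets nodes) = none :=
        (pvEdgeLoopA_eq_none _ _ _).mpr hval
      have hanyt : (edges.any fun p => !((PySem.Set.ofList nodes).contains p.1) ||
          !((PySem.Set.ofList nodes).contains p.2)) = true := by
        rw [List.any_eq_true]
        push Not at hval
        obtain ⟨e, he, hbad⟩ := hval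
        refine ⟨e, he, ?_⟩
        simp only [Bool.or_eq_true, Bool.not_eq_true', Bool.eq_false_iff, Ne,
          PySem.Set.contains_iff, PySem.Set.mem_ofList]
        by_cases h1 : e.1 ∈ nodes
        · exact Or.inr (fun hm => hbad ((PySem.Set.mem_ofList ..).mpr h1)
            ((PySem.Set.mem_ofList ..).mpr hm))
        · exact Or.inl h1
      rw [hnone, hanyt]
      simp
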